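-- pv_equiv track=rewrite | github.com/chenqiu01/MPTA | games/kuhn.py | build_all_possible_hands
-- ===== SOURCE A (Python) =====
-- def build_all_possible_hands(num_players, ranks):
--     """
--     Build all the possible hands for the game of Kuhn with a given number of players and a given set of cards.
--     """
--
--     if(num_players <= 0):
--         return [[]]
--
--     smaller_hands = build_all_possible_hands(num_players-1, ranks)
--     hands = []
--
--     for hand in smaller_hands:
--         remaining_ranks = list(filter(lambda el: el not in hand, ranks))
--         for r in remaining_ranks:
--             hands.append(hand + [r])
--
--     return hands
-- ===== SOURCE B (Python) =====
-- def build_all_possible_hands(num_players, ranks):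
--     if num_players <= 0:
--         return [[]]
--     hands = [[]]
--     for _ in range(num_players):
--         new_hands = []
--         for hand in hands:
--             for r in ranks:
--                 if r not in hand:
--                     new_hands.append(hand + [r])
--         hands = new_hands
--     return hands
-- ===== Notes on version B (the rewrite author's own statement) =====
-- stated objective: idiomatic
-- what changed: Replaced the recursion on num_players by an iterative loop that rebuilds the hands list num_players times, fusing the filter step into the inner loop with a direct membership test.
-- outside the precondition, e.g. on build_all_possible_hands(996, []): A returns [], B returns []
import Mathlib
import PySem

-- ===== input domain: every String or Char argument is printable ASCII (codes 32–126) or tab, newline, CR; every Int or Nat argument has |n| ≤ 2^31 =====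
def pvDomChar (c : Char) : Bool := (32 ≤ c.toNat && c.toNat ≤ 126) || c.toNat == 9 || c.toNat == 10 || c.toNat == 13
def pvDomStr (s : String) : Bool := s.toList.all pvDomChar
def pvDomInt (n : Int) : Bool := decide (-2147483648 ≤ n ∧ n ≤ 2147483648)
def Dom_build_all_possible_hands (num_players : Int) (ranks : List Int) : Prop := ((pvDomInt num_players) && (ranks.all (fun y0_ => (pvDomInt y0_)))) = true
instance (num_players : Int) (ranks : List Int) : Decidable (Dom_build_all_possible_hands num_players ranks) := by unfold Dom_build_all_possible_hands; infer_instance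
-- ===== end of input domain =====

-- B replaces A's recursion on num_players by an iterative loop that rebuilds the
-- hands list num_players times, fusing the filter into a direct membership test
-- in the inner loop (objective: more idiomatic; same cost).

-- ===== PORT A =====
def build_all_possible_hands (num_players : Int) (ranks : List Int) : List (List Int) :=
  if num_players ≤ 0 then [[]]
  else
    let smaller_hands := build_all_possible_hands (num_players - 1) ranks
    smaller_hands.foldl
      (fun hands hand =>
        hands ++ ((ranks.filter (fun el => !(hand.contains el))).map (fun r => hand ++ [r])))
      []
termination_by num_players.toNat
decreasing_by omega

-- ===== PORT B =====
-- one pass of B's outer loop: build new_hands from the current hands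
def pvStep (ranks : List Int) (hands : List (List Int)) : List (List Int) :=
  hands.foldl
    (fun new_hands hand =>
      ranks.foldl
        (fun acc r => if hand.contains r then acc else acc ++ [hand ++ [r]])
        new_hands)
    []

def build_all_possible_hands_alt (num_players : Int) (ranks : List Int) : List (List Int) :=
  if num_players ≤ 0 then [[]]
  else (List.range num_players.toNat).foldl (fun hands _ => pvStep ranks hands) [[]]

-- ===== PRECONDITION & SPEC =====
-- Pre_ excludes num_players above 900: there A's unbounded recursion (depth = num_players)
-- can exceed Python's recursion limit (~1000) and raise RecursionError; for some such inputs
-- (empty ranks, num_players below the limit) A still returns, hence the cite in claim.json.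
def Pre_build_all_possible_hands (num_players : Int) (ranks : List Int) : Prop := num_players ≤ 900
instance (num_players : Int) (ranks : List Int) : Decidable (Pre_build_all_possible_hands num_players ranks) := by unfold Pre_build_all_possible_hands; infer_instance
def pvWitness_build_all_possible_hands : Int × List Int := (3, [1, 2, 3])
def Spec_build_all_possible_hands (num_players : Int) (ranks : List Int) (out : List (List Int)) : Prop := out = build_all_possible_hands_alt num_players ranks
instance (num_players : Int) (ranks : List Int) (out : List (List Int)) : Decidable (Spec_build_all_possible_hands num_players ranks out) := by unfold Spec_build_all_possible_hands; infer_instance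

-- ===== CLAIM (what is proved, stated in full; the proofs are below) =====
def Claim_equal_build_all_possible_hands : Prop := ∀ (num_players : Int) (ranks : List Int), Dom_build_all_possible_hands num_players ranks → Pre_build_all_possible_hands num_players ranks → Spec_build_all_possible_hands num_players ranks (build_all_possible_hands num_players ranks)

-- ===== LEMMAS AND PROOFS =====

-- B's inner loop (membership test) equals A's filter-then-map append.
theorem pv_inner (hand : List Int) (ranks : List Int) (acc : List (List Int)) :
    ranks.foldl (fun acc r => if hand.contains r then acc else acc ++ [hand ++ [r]]) acc
      = acc ++ ((ranks.filter (fun el => !(hand.contains el))).map (fun r => hand ++ [r])) := by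
  induction ranks generalizing acc with
  | nil => simp
  | cons r rs ih =>
    simp only [List.foldl_cons, List.filter_cons]
    cases h : hand.contains r
    · simp only [h, Bool.false_eq_true, if_false, Bool.not_false]
      rw [ih]
      simp
    · simp only [h, if_true, Bool.not_true]
      rw [ih]
      simp

-- A unrolled once equals one pvStep applied to the smaller result.
theorem pv_main (k : Nat) : ∀ (n : Int) (ranks : List Int), n.toNat = k →
    build_all_possible_hands n ranks
      = (List.range k).foldl (fun hands _ => pvStep ranks hands) [[]] := by
  induction k with
  | zero =>
    intro n ranks hk
    have hn : n ≤ 0 := by omega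
    rw [build_all_possible_hands]
    simp [hn]
  | succ k ih =>
    intro n ranks hk
    have hn : ¬ n ≤ 0 := by omega
    rw [build_all_possible_hands]
    simp only [hn, if_false]
    rw [ih (n - 1) ranks (by omega)]
    rw [List.range_succ, List.foldl_append]
    simp only [List.foldl_cons, List.foldl_nil]
    unfold pvStep
    congr 1
    funext hands hand
    exact (pv_inner hand ranks hands).symm

-- ===== VERDICT (by name: the statement is the Claim_ definition above) =====
theorem build_all_possible_hands_spec : Claim_equal_build_all_possible_hands := by
  intro n ranks _ _
  unfold Spec_build_all_possible_hands build_all_possible_hands_alt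
  by_cases hn : n ≤ 0
  · rw [build_all_possible_hands]
    simp [hn]
  · simp only [hn, if_false]
    exact pv_main n.toNat n ranks rfl
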